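-- pv_equiv track=rewrite | github.com/atimms/ratchet_scripts | scripts/cunningham_cs_rnaseq_case_control_0718_ub26.py | make_gene_pair_dict_from_var_dict
-- ===== SOURCE A (Python) =====
-- def make_gene_pair_dict_from_var_dict(gene_dict):
-- 	pair_dict = {}
-- 	for gene1 in gene_dict:
-- 		g1_samples = gene_dict[gene1]
-- 		for g1_sample in g1_samples:
-- 			for gene2 in gene_dict:
-- 				if gene1 != gene2:
-- 					g2_samples = gene_dict[gene2]
-- 					if g1_sample in g2_samples:
-- 						# print gene1, gene2, g1_sample
-- 						gene_pair = gene1 + '_' + gene2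
-- 						if gene_pair in pair_dict:
-- 							pair_dict[gene_pair].append(g1_sample)
-- 						else:
-- 							pair_dict[gene_pair] = [g1_sample]
-- 	# for g in pair_dict:
-- 	# 	print g, pair_dict[g]
-- 	return pair_dict
-- ===== SOURCE B (Python) =====
-- def make_gene_pair_dict_from_var_dict(gene_dict):
--     # invert: sample -> list of genes (in dict order) whose sample list contains it
--     idx = {}
--     for g, ss in gene_dict.items():
--         for s in ss:
--             gs = idx.setdefault(s, [])
--             if not gs or gs[-1] != g:
--                 gs.append(g)
--     pair_dict = {}
--     for g1, ss in gene_dict.items():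
--         for s in ss:
--             for g2 in idx[s]:
--                 if g2 != g1:
--                     pair_dict.setdefault(g1 + '_' + g2, []).append(s)
--     return pair_dict
-- ===== Notes on version B (the rewrite author's own statement) =====
-- stated objective: faster
-- what changed: Instead of scanning every other gene's sample list for every (gene, sample) pair, B builds a sample->genes inverted index in one pass and then, per (gene, sample), iterates only the genes actually co-occurring at that sample.
import Mathlib
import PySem

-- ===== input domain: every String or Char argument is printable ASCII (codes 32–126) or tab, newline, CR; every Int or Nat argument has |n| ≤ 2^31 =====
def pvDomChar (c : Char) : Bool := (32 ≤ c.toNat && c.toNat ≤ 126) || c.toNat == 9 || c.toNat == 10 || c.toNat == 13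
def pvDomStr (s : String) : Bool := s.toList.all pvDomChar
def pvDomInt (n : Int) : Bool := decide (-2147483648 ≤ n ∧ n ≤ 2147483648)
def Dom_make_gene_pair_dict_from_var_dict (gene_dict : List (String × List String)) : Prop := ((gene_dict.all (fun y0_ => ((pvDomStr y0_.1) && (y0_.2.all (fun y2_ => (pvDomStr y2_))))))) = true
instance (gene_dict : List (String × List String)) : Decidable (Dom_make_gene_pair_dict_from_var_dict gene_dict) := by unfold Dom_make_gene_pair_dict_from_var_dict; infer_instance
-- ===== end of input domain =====

-- B replaces A's scan of every other gene's sample list for every (gene, sample) pair by a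
-- sample→genes inverted index built once, then walks only the genes co-occurring at each sample
-- (objective: faster; same return value).


-- ===== PORT A =====
-- helper: A's 'if gene_pair in pair_dict: append else: = [sample]' update
def pvUpdA (pd : PySem.Dict String (List String)) (gp s : String) : PySem.Dict String (List String) :=
  if pd.contains gp then pd.modify gp [] (fun l => l ++ [s]) else pd.insert gp [s]

-- helper: A's innermost 'for gene2 in gene_dict' loop, for fixed gene1 and sample
def pvInnerA (dl : List (String × List String)) (g1 s : String)
    (pd : PySem.Dict String (List String)) : PySem.Dict String (List String) :=
  dl.foldl (fun pd q =>
    if g1 ≠ q.1 then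
      (if q.2.contains s then pvUpdA pd (g1 ++ "_" ++ q.1) s else pd)
    else pd) pd

-- the Python function receives gene_dict as a dict: ofList is the boundary conversion
def make_gene_pair_dict_from_var_dict (gene_dict : List (String × List String)) : List (String × List String) :=
  let d := PySem.Dict.ofList gene_dict
  (d.items.foldl (fun pd p =>
      p.2.foldl (fun pd s => pvInnerA d.items p.1 s pd) pd)
    PySem.Dict.empty).items

-- ===== PORT B =====
-- helper: B's 'pair_dict.setdefault(gp, []).append(s)'
def pvUpdB (pd : PySem.Dict String (List String)) (gp s : String) : PySem.Dict String (List String) :=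
  pd.modify gp [] (fun l => l ++ [s])

-- helper: one step of building the inverted index (append gene g at sample s unless just added)
def pvIdxStep (g : String) (ix : PySem.Dict String (List String)) (s : String) :
    PySem.Dict String (List String) :=
  let gs := ix.getD s []
  if gs.getLast? = some g then ix else ix.insert s (gs ++ [g])

-- helper: sample -> genes (in dict order) whose list contains the sample
def pvIndex (dl : List (String × List String)) : PySem.Dict String (List String) :=
  dl.foldl (fun ix p => p.2.foldl (pvIdxStep p.1) ix) PySem.Dict.empty

-- helper: B's innermost 'for g2 in idx[s]' loop
def pvInnerB (idx : PySem.Dict String (List String)) (g1 s : String)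
    (pd : PySem.Dict String (List String)) : PySem.Dict String (List String) :=
  (idx.getD s []).foldl (fun pd g2 =>
    if g2 ≠ g1 then pvUpdB pd (g1 ++ "_" ++ g2) s else pd) pd

def make_gene_pair_dict_from_var_dict_alt (gene_dict : List (String × List String)) : List (String × List String) :=
  let d := PySem.Dict.ofList gene_dict
  let idx := pvIndex d.items
  (d.items.foldl (fun pd p =>
      p.2.foldl (fun pd s => pvInnerB idx p.1 s pd) pd)
    PySem.Dict.empty).items

-- ===== PRECONDITION & SPEC =====
def Spec_make_gene_pair_dict_from_var_dict (gene_dict : List (String × List String)) (out : List (String × List String)) : Prop := out = make_gene_pair_dict_from_var_dict_alt gene_dict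
instance (gene_dict : List (String × List String)) (out : List (String × List String)) : Decidable (Spec_make_gene_pair_dict_from_var_dict gene_dict out) := by unfold Spec_make_gene_pair_dict_from_var_dict; infer_instance

-- ===== CLAIM (what is proved, stated in full; the proofs are below) =====
def Claim_equal_make_gene_pair_dict_from_var_dict : Prop := ∀ (gene_dict : List (String × List String)), Dom_make_gene_pair_dict_from_var_dict gene_dict → Spec_make_gene_pair_dict_from_var_dict gene_dict (make_gene_pair_dict_from_var_dict gene_dict)

-- ===== LEMMAS AND PROOFS =====

-- the two per-pair updates agree (setdefault+append = the in/insert branch)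
theorem pvUpd_eq (pd : PySem.Dict String (List String)) (gp s : String) :
    pvUpdA pd gp s = pvUpdB pd gp s := by
  unfold pvUpdA pvUpdB
  by_cases h : pd.contains gp
  · simp [h]
  · simp [h, PySem.Dict.modify,
      PySem.Dict.getD_of_not_contains pd ([] : List String) (by simpa using h)]

-- the index entry for s after one gene's sample list
theorem pvIdx_inner (g : String) (l : List String) (ix : PySem.Dict String (List String))
    (s : String) :
    ((l.foldl (pvIdxStep g) ix).getD s []) =
      if (ix.getD s []).getLast? = some g ∨ s ∉ l then ix.getD s []
      else ix.getD s [] ++ [g] := by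
  induction l generalizing ix with
  | nil => simp
  | cons s0 t ih =>
    simp only [List.foldl_cons]
    by_cases h0 : (ix.getD s0 []).getLast? = some g
    · rw [show pvIdxStep g ix s0 = ix by simp [pvIdxStep, h0]]
      rw [ih ix]
      by_cases hs : s = s0
      · subst hs; simp [h0]
      · simp [List.mem_cons, hs]
    · rw [show pvIdxStep g ix s0 = ix.insert s0 (ix.getD s0 [] ++ [g]) by
        simp [pvIdxStep, h0]]
      rw [ih]
      by_cases hs : s = s0
      · subst hs
        simp [h0]
      · simp [PySem.Dict.getD_insert, hs, List.mem_cons]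

-- the index entry for s: genes (in order) whose list contains s
theorem pvIdx_outer (dl : List (String × List String)) (ix : PySem.Dict String (List String))
    (s : String)
    (hfresh : ∀ p ∈ dl, ∀ x ∈ ix.getD s [], x ≠ p.1)
    (hnd : (dl.map Prod.fst).Nodup) :
    (dl.foldl (fun ix p => p.2.foldl (pvIdxStep p.1) ix) ix).getD s []
      = ix.getD s [] ++ (dl.filter (fun q => q.2.contains s)).map Prod.fst := by
  induction dl generalizing ix with
  | nil => simp
  | cons p t ih =>
    simp only [List.foldl_cons]
    have hlast : ¬ ((ix.getD s []).getLast? = some p.1) := by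
      intro h
      exact hfresh p (List.mem_cons_self) p.1 (List.mem_of_getLast? h) rfl
    have h1 : (p.2.foldl (pvIdxStep p.1) ix).getD s []
        = ix.getD s [] ++ (if p.2.contains s then [p.1] else []) := by
      rw [pvIdx_inner]
      by_cases hm : s ∈ p.2
      · simp [hlast, hm]
      · simp [hlast, hm]
    rw [ih]
    · rw [h1]
      by_cases hm : s ∈ p.2 <;>
        simp [hm, List.append_assoc]
    · intro q hq x hx
      rw [h1] at hx
      rcases List.mem_append.mp hx with hx | hx
      · exact hfresh q (List.mem_cons_of_mem _ hq) x hx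
      · have hxp : x = p.1 := by
          by_cases hc : p.2.contains s
          · simp only [hc, if_true] at hx
            simpa using hx
          · simp at hx
            exact hx.2
        subst hxp
        intro hcontra
        have : p.1 ∈ t.map Prod.fst := hcontra ▸ List.mem_map_of_mem hq
        exact (List.nodup_cons.mp hnd).1 this
    · exact (List.nodup_cons.mp hnd).2

-- A's inner scan over all genes = a fold over the genes whose list contains s
theorem pvInner_eq (dl : List (String × List String)) (g1 s : String)
    (pd : PySem.Dict String (List String)) :
    pvInnerA dl g1 s pd
      = ((dl.filter (fun q => q.2.contains s)).map Prod.fst).foldl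
          (fun pd g2 => if g2 ≠ g1 then pvUpdB pd (g1 ++ "_" ++ g2) s else pd) pd := by
  induction dl generalizing pd with
  | nil => simp [pvInnerA]
  | cons q t ih =>
    have hA : pvInnerA (q :: t) g1 s pd
        = pvInnerA t g1 s
            (if g1 ≠ q.1 then (if q.2.contains s then pvUpdA pd (g1 ++ "_" ++ q.1) s else pd)
             else pd) := rfl
    rw [hA, ih]
    by_cases hc : q.2.contains s
    · simp only [hc, if_true, List.filter_cons, List.map_cons, List.foldl_cons]
      congr 1
      by_cases hne : g1 = q.1
      · simp [hne]
      · simp [hne, Ne.symm hne, pvUpd_eq]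
    · have hm : s ∉ q.2 := by simpa [List.contains_iff_mem] using hc
      simp [hm]

-- ===== VERDICT (by name: the statement is the Claim_ definition above) =====
theorem make_gene_pair_dict_from_var_dict_spec : Claim_equal_make_gene_pair_dict_from_var_dict := by
  intro gene_dict _
  unfold Spec_make_gene_pair_dict_from_var_dict
  simp only [make_gene_pair_dict_from_var_dict, make_gene_pair_dict_from_var_dict_alt]
  have hnd : ((PySem.Dict.ofList gene_dict).items.map Prod.fst).Nodup := by
    have := PySem.Dict.nodup_keys_ofList gene_dict
    simpa [PySem.Dict.keys] using this
  have hidx : ∀ s, (pvIndex (PySem.Dict.ofList gene_dict).items).getD s []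
      = ((PySem.Dict.ofList gene_dict).items.filter (fun q => q.2.contains s)).map Prod.fst := by
    intro s
    unfold pvIndex
    rw [pvIdx_outer _ _ _ (by simp [PySem.Dict.getD_empty]) hnd]
    simp [PySem.Dict.getD_empty]
  have hfun : (fun pd (p : String × List String) =>
        p.2.foldl (fun pd s => pvInnerA (PySem.Dict.ofList gene_dict).items p.1 s pd) pd)
      = (fun pd (p : String × List String) =>
        p.2.foldl (fun pd s =>
          pvInnerB (pvIndex (PySem.Dict.ofList gene_dict).items) p.1 s pd) pd) := by
    funext pd p
    congr 1
    funext pd s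
    rw [pvInnerB, hidx s, pvInner_eq]
  rw [hfun]
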